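-- pv_equiv track=rewrite | github.com/FifiLeul/PyCharmProjects | FoobarSolution2/Solution.py | get_end_num_x
-- ===== SOURCE A (Python) =====
-- def get_end_num_x(x):
--     lst = [1]
--     i = 1
--     incrementation = 1
--     for l in range(x):
--         lst.append(lst[i - 1] + incrementation + 1)
--         i += 1
--         incrementation += 1
--     return lst[-1]
-- ===== SOURCE B (Python) =====
-- def get_end_num_x(x):
--     # closed form: last element is 1 + x + x*(x+1)//2 for x >= 0; empty loop for x <= 0
--     return 1 if x <= 0 else 1 + x + x * (x + 1) // 2
-- ===== Notes on version B (the rewrite author's own statement) =====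
-- stated objective: faster
-- what changed: replaced the list-building loop by the closed-form triangular-number formula 1 + x + x*(x+1)//2
import Mathlib
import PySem

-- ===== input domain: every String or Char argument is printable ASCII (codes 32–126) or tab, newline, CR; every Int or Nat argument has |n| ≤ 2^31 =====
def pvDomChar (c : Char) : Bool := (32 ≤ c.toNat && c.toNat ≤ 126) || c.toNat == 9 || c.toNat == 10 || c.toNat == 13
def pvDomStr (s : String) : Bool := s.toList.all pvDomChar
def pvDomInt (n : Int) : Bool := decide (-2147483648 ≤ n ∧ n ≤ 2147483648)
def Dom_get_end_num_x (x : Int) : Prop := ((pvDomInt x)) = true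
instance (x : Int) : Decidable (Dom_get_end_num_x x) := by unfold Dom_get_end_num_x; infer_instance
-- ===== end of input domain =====

-- B replaces A's list-building loop by the closed-form formula 1 + x + x*(x+1)//2 (faster, O(1)).

-- ===== PORT A =====
-- state: (lst, i, incrementation); lst[i-1] and lst[-1] are always in range (lst has i elements),
-- so the pyGetD defaults are never used and the port is exact.
def pvStepA (st : List Int × Int × Int) (_ : Int) : List Int × Int × Int :=
  (st.1 ++ [PySem.List.pyGetD st.1 (st.2.1 - 1) 0 + st.2.2 + 1], st.2.1 + 1, st.2.2 + 1)

def get_end_num_x (x : Int) : Int :=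
  let s := (PySem.List.pyRange 0 x 1).foldl pvStepA ([1], 1, 1)
  PySem.List.pyGetD s.1 (-1) 0

-- ===== PORT B =====
def get_end_num_x_alt (x : Int) : Int :=
  if x ≤ 0 then 1 else 1 + x + PySem.Int.floordiv (x * (x + 1)) 2

-- ===== PRECONDITION & SPEC =====
def Spec_get_end_num_x (x : Int) (out : Int) : Prop := out = get_end_num_x_alt x
instance (x : Int) (out : Int) : Decidable (Spec_get_end_num_x x out) := by unfold Spec_get_end_num_x; infer_instance

-- ===== CLAIM (what is proved, stated in full; the proofs are below) =====
def Claim_equal_get_end_num_x : Prop := ∀ (x : Int), Dom_get_end_num_x x → Spec_get_end_num_x x (get_end_num_x x)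

-- ===== LEMMAS AND PROOFS =====

def pvV (n : Nat) : Int := ((1 + n + n * (n + 1) / 2 : Nat) : Int)

theorem pvInvA (n : Nat) :
    ∃ l : List Int, (PySem.List.pyRange 0 (n : Int) 1).foldl pvStepA ([1], 1, 1) =
      (l ++ [pvV n], (n : Int) + 1, (n : Int) + 1) ∧ l.length = n := by
  induction n with
  | zero =>
      exact ⟨[], by simp [PySem.List.pyRange_one_eq_nil, pvV], rfl⟩
  | succ n ih =>
      obtain ⟨l, hfold, hlen⟩ := ih
      refine ⟨l ++ [pvV n], ?_, by simp [hlen]⟩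
      have hsplit : PySem.List.pyRange 0 ((n + 1 : Nat) : Int) 1 =
          PySem.List.pyRange 0 (n : Int) 1 ++ [(n : Int)] := by
        push_cast
        exact PySem.List.pyRange_one_succ_right (by positivity)
      rw [hsplit, List.foldl_append, hfold]
      simp only [pvStepA, List.foldl_cons, List.foldl_nil]
      have hidx : (n : Int) + 1 - 1 = (l.length : Int) := by omega
      have hget : PySem.List.pyGetD (l ++ [pvV n]) ((n : Int) + 1 - 1) 0 = pvV n := by
        rw [hidx]
        simpa using PySem.List.pyGetD_eq_getElem (l ++ [pvV n]) (l.length : Int) 0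
          (by omega) (by simp)
      rw [hget]
      have hv : pvV n + ((n : Int) + 1) + 1 = pvV (n + 1) := by
        simp only [pvV]
        have he : n * (n + 1) % 2 = 0 := Nat.even_iff.mp (Nat.even_mul_succ_self n)
        have hb : (n + 1) * (n + 1 + 1) = n * (n + 1) + 2 * (n + 1) := by ring
        omega
      rw [hv]
      push_cast
      ring_nf

-- ===== VERDICT (by name: the statement is the Claim_ definition above) =====
theorem get_end_num_x_spec : Claim_equal_get_end_num_x := by
  intro x _
  unfold Spec_get_end_num_x get_end_num_x get_end_num_x_alt
  by_cases hx : x ≤ 0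
  · rw [PySem.List.pyRange_one_eq_nil hx]
    simp [hx]
    decide
  · obtain ⟨n, rfl⟩ : ∃ n : Nat, x = (n : Int) := ⟨x.toNat, by omega⟩
    obtain ⟨l, hfold, _⟩ := pvInvA n
    rw [hfold]
    simp only [PySem.List.pyGetD_neg_one_append_singleton]
    rw [if_neg (by omega)]
    simp only [pvV]
    have he : n * (n + 1) % 2 = 0 := Nat.even_iff.mp (Nat.even_mul_succ_self n)
    have hcast : ((n * (n + 1) : Nat) : Int) = (n : Int) * ((n : Int) + 1) := by push_cast; ring
    simp only [PySem.Int.floordiv]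
    rw [Int.fdiv_eq_ediv]
    omega
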